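-- pv_equiv track=rewrite | github.com/Sassi1000/Solutions_to_problems_at_the_LeetCode_level | DistanceFinder/DistanceFinder/DistanceFinder.py | DistanceFinder
-- ===== SOURCE A (Python) =====
-- def DistanceFinder(a, num):
--     left=0
--     while(left<len(a) and a[left]!=num):
--         left+=1
--     if(left==len(a)):
--         return -1
--     right=len(a)-1
--     while(a[right]!=num):
--         right-=1
--     return left+(len(a)-1-right)
-- ===== SOURCE B (Python) =====
-- def DistanceFinder(a, num):
--     idx = [i for i, x in enumerate(a) if x == num]
--     if not idx:
--         return -1
--     return idx[0] + (len(a) - 1 - idx[-1])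
-- ===== Notes on version B (the rewrite author's own statement) =====
-- stated objective: simpler
-- what changed: Replaces A's two early-terminating end scans (a forward while loop and a backward while loop) with a single full pass collecting all matching indices, then reads the first and last collected index.
import Mathlib
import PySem

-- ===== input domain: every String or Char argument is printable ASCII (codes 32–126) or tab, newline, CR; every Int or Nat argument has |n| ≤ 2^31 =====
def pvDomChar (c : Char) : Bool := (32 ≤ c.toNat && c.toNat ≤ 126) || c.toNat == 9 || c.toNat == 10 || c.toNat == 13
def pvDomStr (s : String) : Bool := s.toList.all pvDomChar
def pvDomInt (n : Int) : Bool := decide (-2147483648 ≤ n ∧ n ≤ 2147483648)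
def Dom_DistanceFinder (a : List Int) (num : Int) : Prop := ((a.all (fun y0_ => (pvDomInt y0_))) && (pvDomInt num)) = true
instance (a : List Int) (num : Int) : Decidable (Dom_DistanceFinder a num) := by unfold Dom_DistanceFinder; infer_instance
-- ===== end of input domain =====

-- B replaces A's two early-terminating end scans with a single full pass collecting the
-- matching indices and reading the first and last of them (objective: simpler).

-- ===== PORT A =====
-- while(left<len(a) and a[left]!=num): left+=1
def pvGoLeft (a : List Int) (num : Int) (left : Nat) : Nat :=
  if h : left < a.length then
    if a[left] ≠ num then pvGoLeft a num (left + 1) else left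
  else left
termination_by a.length - left

-- while(a[right]!=num): right-=1   (A only runs this when num occurs in a, so the
-- loop stops before the index leaves the list; the 0-case of the match is unreachable then)
def pvGoRight (a : List Int) (num : Int) : Nat → Nat
  | 0 => 0
  | r + 1 => if a.getD (r + 1) 0 ≠ num then pvGoRight a num r else r + 1

def DistanceFinder (a : List Int) (num : Int) : Int :=
  let left := pvGoLeft a num 0
  if left = a.length then -1
  else
    let right := pvGoRight a num (a.length - 1)
    (left : Int) + ((a.length : Int) - 1 - (right : Int))

-- ===== PORT B =====
def DistanceFinder_alt (a : List Int) (num : Int) : Int :=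
  let idx := ((PySem.List.enumerate a 0).filter (fun p => p.2 == num)).map (fun p => p.1)
  if idx.isEmpty then -1
  else idx.head! + ((a.length : Int) - 1 - idx.getLast!)

-- ===== PRECONDITION & SPEC =====
def Spec_DistanceFinder (a : List Int) (num : Int) (out : Int) : Prop := out = DistanceFinder_alt a num
instance (a : List Int) (num : Int) (out : Int) : Decidable (Spec_DistanceFinder a num out) := by unfold Spec_DistanceFinder; infer_instance

-- ===== CLAIM (what is proved, stated in full; the proofs are below) =====
def Claim_equal_DistanceFinder : Prop := ∀ (a : List Int) (num : Int), Dom_DistanceFinder a num → Spec_DistanceFinder a num (DistanceFinder a num)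

-- ===== LEMMAS AND PROOFS =====

-- the index list B builds, with a general start offset
def pvIdx (a : List Int) (num : Int) (s : Int) : List Int :=
  ((PySem.List.enumerate a s).filter (fun p => p.2 == num)).map (fun p => p.1)

theorem pvIdx_nil (num : Int) (s : Int) : pvIdx [] num s = [] := rfl

theorem pvIdx_cons (x : Int) (xs : List Int) (num s : Int) :
    pvIdx (x :: xs) num s =
      if x = num then s :: pvIdx xs num (s + 1) else pvIdx xs num (s + 1) := by
  simp [pvIdx, PySem.List.enumerate_cons]
  split_ifs <;> simp_all

theorem pvIdx_eq_nil_iff (xs : List Int) (num s : Int) :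
    pvIdx xs num s = [] ↔ num ∉ xs := by
  induction xs generalizing s with
  | nil => simp [pvIdx_nil]
  | cons x xs ih =>
    rw [pvIdx_cons]
    split_ifs with h <;> simp [h, ih] <;> tauto

theorem pvIdx_head (xs : List Int) (num s : Int) (h : num ∈ xs) :
    (pvIdx xs num s).head! = s + (xs.findIdx (· == num) : Int) := by
  induction xs generalizing s with
  | nil => cases h
  | cons x xs ih =>
    rw [pvIdx_cons]
    by_cases hx : x = num
    · simp [hx, List.findIdx_cons]
    · have hm : num ∈ xs := by cases h with
        | head => exact absurd rfl hx
        | tail _ h => exact h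
      have hb : (x == num) = false := by simp [hx]
      rw [if_neg hx, ih (s + 1) hm, List.findIdx_cons, hb]
      simp only [cond_false]
      push_cast
      ring

theorem pvGoLeft_eq (a : List Int) (num : Int) :
    ∀ l, l ≤ a.length → pvGoLeft a num l = l + (a.drop l).findIdx (· == num) := by
  intro l hl
  induction hn : a.length - l generalizing l with
  | zero =>
    have : l = a.length := by omega
    subst this
    rw [pvGoLeft]
    simp
  | succ n ih =>
    have hlt : l < a.length := by omega
    rw [pvGoLeft]
    have hdrop : a.drop l = a[l] :: a.drop (l + 1) := List.drop_eq_getElem_cons hlt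
    rw [hdrop, List.findIdx_cons]
    by_cases hx : a[l] = num
    · simp [hlt, hx]
    · have hb : (a[l] == num) = false := by simp [hx]
      have := ih (l + 1) (by omega) (by omega)
      simp [hlt, hx, hb, this]
      omega

theorem pvGoLeft_zero (a : List Int) (num : Int) :
    pvGoLeft a num 0 = a.findIdx (· == num) := by
  simpa using pvGoLeft_eq a num 0 (Nat.zero_le _)

theorem pvGoRight_append (xs : List Int) (x num : Int) :
    ∀ r, r < xs.length → pvGoRight (xs ++ [x]) num r = pvGoRight xs num r := by
  intro r hr
  induction r with
  | zero => rfl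
  | succ n ih =>
    have hget : (xs ++ [x]).getD (n + 1) 0 = xs.getD (n + 1) 0 := by
      simp [List.getD, List.getElem?_append_left (show n + 1 < xs.length from hr)]
    rw [pvGoRight, pvGoRight, hget]
    split_ifs with h
    · exact ih (by omega)
    · rfl

theorem pvIdx_append (xs : List Int) (x num s : Int) :
    pvIdx (xs ++ [x]) num s =
      pvIdx xs num s ++ (if x = num then [s + xs.length] else []) := by
  simp [pvIdx, PySem.List.enumerate_append, PySem.List.enumerate_cons]
  split_ifs <;> simp_all

theorem pvGoRight_last (a : List Int) (num : Int) (h : num ∈ a) :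
    (pvGoRight a num (a.length - 1) : Int) = (pvIdx a num 0).getLast! := by
  induction a using List.reverseRecOn with
  | nil => cases h
  | append_singleton xs x ih =>
    have hL : (xs ++ [x]).length - 1 = xs.length := by simp
    rw [hL, pvIdx_append]
    by_cases hx : x = num
    · rw [if_pos hx]
      have hstop : pvGoRight (xs ++ [x]) num xs.length = xs.length := by
        cases hxs : xs.length with
        | zero => rw [pvGoRight]
        | succ m =>
          have hgd : (xs ++ [x]).getD (m + 1) 0 = x := by
            rw [List.getD, List.getElem?_append_right (by omega), hxs]
            simp
          rw [pvGoRight, hgd, if_neg (by simp [hx])]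
      rw [hstop]
      simp
    · have hm : num ∈ xs := by
        rcases List.mem_append.mp h with h' | h'
        · exact h'
        · simp at h'; exact absurd h'.symm hx
      have hne : xs ≠ [] := by rintro rfl; cases hm
      obtain ⟨m, hxs⟩ : ∃ m, xs.length = m + 1 :=
        ⟨xs.length - 1, by have := List.length_pos_iff.mpr hne; omega⟩
      have hgd : (xs ++ [x]).getD (m + 1) 0 = x := by
        rw [List.getD, List.getElem?_append_right (by omega), hxs]
        simp
      have hstep : pvGoRight (xs ++ [x]) num xs.length = pvGoRight xs num m := by
        rw [hxs, pvGoRight, hgd, if_pos hx]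
        exact pvGoRight_append xs x num m (by omega)
      rw [if_neg hx, List.append_nil, hstep]
      have hm1 : xs.length - 1 = m := by omega
      rw [← hm1]
      exact ih hm

-- ===== VERDICT (by name: the statement is the Claim_ definition above) =====
theorem DistanceFinder_spec : Claim_equal_DistanceFinder := by
  intro a num _
  unfold Spec_DistanceFinder DistanceFinder DistanceFinder_alt
  by_cases h : num ∈ a
  · have hne : pvIdx a num 0 ≠ [] := by rw [Ne, pvIdx_eq_nil_iff]; simpa using h
    have hlt : a.findIdx (· == num) < a.length :=
      List.findIdx_lt_length.mpr ⟨num, h, by simp⟩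
    have hlen : a ≠ [] := by rintro rfl; cases h
    simp only [pvGoLeft_zero]
    rw [if_neg (by omega)]
    have hempty : (((PySem.List.enumerate a 0).filter (fun p => p.2 == num)).map
        (fun p => p.1)).isEmpty = false := by
      rw [List.isEmpty_eq_false_iff]
      exact hne
    rw [hempty]
    simp only [Bool.false_eq_true, if_false]
    have hhead := pvIdx_head a num 0 h
    have hlast := pvGoRight_last a num h
    simp only [pvIdx] at hhead hlast
    rw [hhead, hlast]
    ring
  · have hnil : pvIdx a num 0 = [] := (pvIdx_eq_nil_iff a num 0).mpr h
    have hfi : a.findIdx (· == num) = a.length := by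
      rw [List.findIdx_eq_length]
      intro x hx
      simp
      rintro rfl
      exact h hx
    simp only [pvGoLeft_zero, hfi]
    have : (((PySem.List.enumerate a 0).filter (fun p => p.2 == num)).map
        (fun p => p.1)).isEmpty = true := by
      rw [List.isEmpty_iff]
      exact hnil
    rw [this]
    simp
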